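-- pv_equiv track=rewrite | github.com/anurag288/chunkops | chunkops/strategies/fixed.py | _word_positions
-- ===== SOURCE A (Python) =====
-- from typing import List, Tuple
--
-- def _word_positions(text: str) -> List[Tuple[int, int]]:
--     """Return (start, end) char positions for each word in text."""
--     positions = []
--     idx = 0
--     for word in text.split():
--         start = text.index(word, idx)
--         end = start + len(word)
--         positions.append((start, end))
--         idx = end
--     return positions
-- ===== SOURCE B (Python) =====
-- from typing import List, Tuple
--
-- def _word_positions(text: str) -> List[Tuple[int, int]]:
--     """Return (start, end) char positions for each word in text.
--
--     Single left-to-right character scan: track the start of the current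
--     word; emit (start, i) when whitespace ends a word.
--     """
--     positions = []
--     start = None
--     for i, ch in enumerate(text):
--         if ch.isspace():
--             if start is not None:
--                 positions.append((start, i))
--                 start = None
--         elif start is None:
--             start = i
--     if start is not None:
--         positions.append((start, len(text)))
--     return positions
-- ===== Notes on version B (the rewrite author's own statement) =====
-- stated objective: alternative
-- what changed: Replaces split() plus repeated substring search (text.index) with one character-level scan that tracks the start index of the current word and emits (start, end) at each whitespace boundary.
import Mathlib
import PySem

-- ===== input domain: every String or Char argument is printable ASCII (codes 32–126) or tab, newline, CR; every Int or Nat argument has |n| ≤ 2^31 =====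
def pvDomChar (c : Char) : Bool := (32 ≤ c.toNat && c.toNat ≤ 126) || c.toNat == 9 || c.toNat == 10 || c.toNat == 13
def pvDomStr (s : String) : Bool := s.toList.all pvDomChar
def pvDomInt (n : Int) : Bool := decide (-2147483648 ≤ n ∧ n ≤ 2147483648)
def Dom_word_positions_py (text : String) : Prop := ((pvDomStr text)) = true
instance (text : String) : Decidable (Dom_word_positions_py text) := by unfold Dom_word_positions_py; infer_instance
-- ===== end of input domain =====

-- B replaces split() + repeated text.index with one character-level scan (alternative decomposition, same cost).

-- ===== PORT A =====
-- loop body of A's 'for word in text.split()': start = text.index(word, idx); end = start + len(word).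
-- text.index is ported as PySem.Chars.findFrom (Python's str.find): on every input the searched word
-- comes from text.split(), so it always occurs at or after idx and the ValueError branch (-1) is unreachable.
def wpAstep (t : List Char) (st : List (Int × Int) × Int) (word : List Char) : List (Int × Int) × Int :=
  let start := PySem.Chars.findFrom t word st.2
  let e := start + word.length
  (st.1 ++ [(start, e)], e)

def word_positions_py (text : String) : List (Int × Int) :=
  ((PySem.Chars.split₀ text.toList).foldl (wpAstep text.toList) ([], 0)).1

-- ===== PORT B =====
-- B's scan: i is the current index, start the start of the word being read (None = not in a word).
def wpScan : List Char → Nat → Option Nat → List (Int × Int)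
  | [], i, some st => [((st : Int), (i : Int))]
  | [], _, none => []
  | c :: rest, i, start =>
    if PySem.Chars.isspace c then
      match start with
      | some st => ((st : Int), (i : Int)) :: wpScan rest (i + 1) none
      | none => wpScan rest (i + 1) none
    else
      match start with
      | some st => wpScan rest (i + 1) (some st)
      | none => wpScan rest (i + 1) (some i)

def word_positions_py_alt (text : String) : List (Int × Int) :=
  wpScan text.toList 0 none

-- ===== PRECONDITION & SPEC =====
def Spec_word_positions_py (text : String) (out : List (Int × Int)) : Prop := out = word_positions_py_alt text
instance (text : String) (out : List (Int × Int)) : Decidable (Spec_word_positions_py text out) := by unfold Spec_word_positions_py; infer_instance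

-- ===== CLAIM (what is proved, stated in full; the proofs are below) =====
def Claim_equal_word_positions_py : Prop := ∀ (text : String), Dom_word_positions_py text → Spec_word_positions_py text (word_positions_py text)


-- ===== LEMMAS AND PROOFS =====

-- split₀.go only ever appends finished words to its accumulator
lemma wp_go_acc (s : List Char) : ∀ cur acc, PySem.Chars.split₀.go s cur acc =
    acc.reverse ++ PySem.Chars.split₀.go s cur [] := by
  induction s with
  | nil =>
    intro cur acc
    by_cases h : cur.isEmpty <;> simp [PySem.Chars.split₀.go, h]
  | cons c rest ih =>
    intro cur acc
    by_cases hc : PySem.Chars.isspace c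
    · by_cases hcur : cur.isEmpty
      · simp only [PySem.Chars.split₀.go, hc, hcur, if_true]
        rw [ih [] acc]
      · simp only [PySem.Chars.split₀.go, hc, hcur, if_true]
        rw [ih [] (cur.reverse :: acc), ih [] [cur.reverse]]
        simp
    · simp only [PySem.Chars.split₀.go, hc]
      exact ih (c :: cur) acc

-- a run of non-space characters is absorbed into cur
lemma wp_go_word (w : List Char) : ∀ s cur, (∀ c ∈ w, PySem.Chars.isspace c = false) →
    PySem.Chars.split₀.go (w ++ s) cur [] = PySem.Chars.split₀.go s (w.reverse ++ cur) [] := by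
  induction w with
  | nil => intro s cur _; simp
  | cons c w' ih =>
    intro s cur hw
    have hc : PySem.Chars.isspace c = false := hw c (by simp)
    simp only [List.cons_append, PySem.Chars.split₀.go, hc, Bool.false_eq_true, if_false]
    rw [ih s (c :: cur) (fun d hd => hw d (by simp [hd]))]
    simp

-- leading whitespace is skipped when cur is empty
lemma wp_go_space (sp : List Char) : ∀ s, (∀ c ∈ sp, PySem.Chars.isspace c = true) →
    PySem.Chars.split₀.go (sp ++ s) [] [] = PySem.Chars.split₀.go s [] [] := by
  induction sp with
  | nil => intro s _; simp
  | cons c sp' ih =>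
    intro s hsp
    have hc : PySem.Chars.isspace c = true := hsp c (by simp)
    simp only [List.cons_append, PySem.Chars.split₀.go, hc, List.isEmpty_nil, if_true]
    exact ih s (fun d hd => hsp d (by simp [hd]))

lemma wp_split_all_space (s : List Char) (h : ∀ c ∈ s, PySem.Chars.isspace c = true) :
    PySem.Chars.split₀ s = [] := by
  have := wp_go_space s [] h
  simpa [PySem.Chars.split₀, PySem.Chars.split₀.go] using this

-- split₀ of  spaces ++ word ++ rest  is  word :: split₀ rest
lemma wp_split_decomp (sp w r : List Char)
    (hsp : ∀ c ∈ sp, PySem.Chars.isspace c = true) (hw0 : w ≠ [])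
    (hw : ∀ c ∈ w, PySem.Chars.isspace c = false)
    (hr : r = [] ∨ ∃ d r', r = d :: r' ∧ PySem.Chars.isspace d = true) :
    PySem.Chars.split₀ (sp ++ w ++ r) = w :: PySem.Chars.split₀ r := by
  unfold PySem.Chars.split₀
  rw [List.append_assoc, wp_go_space sp (w ++ r) hsp, wp_go_word w r [] hw]
  rcases hr with rfl | ⟨d, r', rfl, hd⟩
  · simp [PySem.Chars.split₀.go, hw0]
  · have hcur : (w.reverse ++ ([] : List Char)).isEmpty = false := by
      simp [hw0]
    simp only [PySem.Chars.split₀.go, hd, hcur, if_true, Bool.false_eq_true, if_false,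
      List.isEmpty_nil]
    rw [wp_go_acc r' []]
    simp

-- ===== B-side decompositions =====

lemma wp_scan_space (sp : List Char) : ∀ s i, (∀ c ∈ sp, PySem.Chars.isspace c = true) →
    wpScan (sp ++ s) i none = wpScan s (i + sp.length) none := by
  induction sp with
  | nil => intro s i _; simp
  | cons c sp' ih =>
    intro s i hsp
    have hc : PySem.Chars.isspace c = true := hsp c (by simp)
    simp only [List.cons_append, wpScan, hc, if_true]
    rw [ih s (i + 1) (fun d hd => hsp d (by simp [hd]))]
    congr 1
    simp [List.length_cons]
    omega

lemma wp_scan_word (w : List Char) : ∀ s i st, (∀ c ∈ w, PySem.Chars.isspace c = false) →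
    wpScan (w ++ s) i (some st) = wpScan s (i + w.length) (some st) := by
  induction w with
  | nil => intro s i st _; simp
  | cons c w' ih =>
    intro s i st hw
    have hc : PySem.Chars.isspace c = false := hw c (by simp)
    simp only [List.cons_append, wpScan, hc, Bool.false_eq_true, if_false]
    rw [ih s (i + 1) st (fun d hd => hw d (by simp [hd]))]
    congr 1
    simp [List.length_cons]
    omega

lemma wp_scan_close (r : List Char) (i st : Nat)
    (hr : r = [] ∨ ∃ d r', r = d :: r' ∧ PySem.Chars.isspace d = true) :
    wpScan r i (some st) = ((st : Int), (i : Int)) :: wpScan r i none := by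
  rcases hr with rfl | ⟨d, r', rfl, hd⟩
  · simp [wpScan]
  · simp [wpScan, hd]

lemma wp_scan_all_space (s : List Char) (i : Nat)
    (h : ∀ c ∈ s, PySem.Chars.isspace c = true) : wpScan s i none = [] := by
  have := wp_scan_space s [] i h
  simpa [wpScan] using this

-- every string is all-whitespace or  spaces ++ word ++ rest  with rest starting in whitespace
lemma wp_decomp (s : List Char) : (∀ c ∈ s, PySem.Chars.isspace c = true) ∨
    ∃ sp w r, s = sp ++ w ++ r ∧ (∀ c ∈ sp, PySem.Chars.isspace c = true) ∧ w ≠ [] ∧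
      (∀ c ∈ w, PySem.Chars.isspace c = false) ∧
      (r = [] ∨ ∃ d r', r = d :: r' ∧ PySem.Chars.isspace d = true) := by
  rcases h2 : s.dropWhile PySem.Chars.isspace with _ | ⟨c, rest⟩
  · left
    intro x hx
    rw [← s.takeWhile_append_dropWhile (p := PySem.Chars.isspace), h2, List.append_nil] at hx
    exact List.mem_takeWhile_imp hx
  · right
    have hc : PySem.Chars.isspace c = false := by
      simpa [h2] using List.head_dropWhile_not PySem.Chars.isspace (l := s) (by simp [h2])
    refine ⟨s.takeWhile PySem.Chars.isspace,
      (c :: rest).takeWhile (fun d => !PySem.Chars.isspace d),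
      (c :: rest).dropWhile (fun d => !PySem.Chars.isspace d), ?_, ?_, ?_, ?_, ?_⟩
    · rw [List.append_assoc, List.takeWhile_append_dropWhile, ← h2,
        List.takeWhile_append_dropWhile]
    · exact fun x hx => List.mem_takeWhile_imp hx
    · simp [hc]
    · intro x hx
      have := List.mem_takeWhile_imp hx
      simpa using this
    · rcases h3 : (c :: rest).dropWhile (fun d => !PySem.Chars.isspace d) with _ | ⟨d, r'⟩
      · exact Or.inl rfl
      · right
        refine ⟨d, r', rfl, ?_⟩
        simpa [h3] using List.head_dropWhile_not (fun d => !PySem.Chars.isspace d)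
          (l := c :: rest) (by simp [h3])

-- ===== A-side: text.index finds exactly the start of the word =====

lemma wp_find_decomp (sp w r : List Char)
    (hsp : ∀ c ∈ sp, PySem.Chars.isspace c = true) (hw0 : w ≠ [])
    (hw : ∀ c ∈ w, PySem.Chars.isspace c = false) :
    PySem.Chars.find (sp ++ w ++ r) w = (sp.length : Int) := by
  set s := sp ++ w ++ r with hs
  have hocc : w <+: s.drop sp.length := by
    rw [hs, List.append_assoc, List.drop_left]
    exact List.prefix_append w r
  have hbelow : ∀ i, i < sp.length → ¬ w <+: s.drop i := by
    intro i hi hpre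
    obtain ⟨hw1, w', rfl⟩ : ∃ a l, w = a :: l := List.exists_cons_of_ne_nil hw0
    have hdi : s.drop i = sp[i] :: (sp.drop (i + 1) ++ ((hw1 :: w') ++ r)) := by
      rw [hs, List.append_assoc, List.drop_append_of_le_length (le_of_lt hi),
        List.drop_eq_getElem_cons hi, List.cons_append]
    rw [hdi] at hpre
    obtain ⟨t, ht⟩ := hpre
    have : hw1 = sp[i] := by
      simpa using congrArg (fun l => l.head?) ht
    have h1 : PySem.Chars.isspace hw1 = false := hw hw1 (by simp)
    have h2 : PySem.Chars.isspace sp[i] = true := hsp sp[i] (List.getElem_mem hi)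
    rw [this, h2] at h1
    exact Bool.true_eq_false.mp h1
  have hinf : w <:+: s := ⟨sp, r, by rw [hs, List.append_assoc]⟩
  have hne : PySem.Chars.find s w ≠ -1 := (PySem.Chars.find_ne_neg_one_iff s w).mpr hinf
  have hnn : 0 ≤ PySem.Chars.find s w := (PySem.Chars.find_nonneg_iff s w).mpr hinf
  have hff : PySem.Chars.findFrom s w ((0 : Nat) : Int) none = PySem.Chars.find s w := by
    simp
  have hspec := PySem.Chars.findFrom_natCast_spec s w 0 (Nat.zero_le _) (by rw [hff]; exact hne)
  rw [hff] at hspec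
  obtain ⟨-, hpre, hmin⟩ := hspec
  have hle : (PySem.Chars.find s w).toNat ≤ sp.length := by
    by_contra hlt
    exact hmin sp.length (Nat.zero_le _) (by omega) hocc
  have hge : ¬ (PySem.Chars.find s w).toNat < sp.length := fun hlt => hbelow _ hlt hpre
  have : (PySem.Chars.find s w).toNat = sp.length := by omega
  omega

lemma wp_findFrom_decomp (t : List Char) (idx : Nat) (sp w r : List Char)
    (hidx : idx ≤ t.length) (hdrop : t.drop idx = sp ++ w ++ r)
    (hsp : ∀ c ∈ sp, PySem.Chars.isspace c = true) (hw0 : w ≠ [])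
    (hw : ∀ c ∈ w, PySem.Chars.isspace c = false) :
    PySem.Chars.findFrom t w (idx : Int) none = ((idx + sp.length : Nat) : Int) := by
  rw [PySem.Chars.findFrom_natCast t w idx hidx, hdrop,
    wp_find_decomp sp w r hsp hw0 hw]
  rw [if_neg (by omega : ¬ ((sp.length : Int)) = -1)]
  push_cast
  ring

-- ===== main loop correspondence =====

lemma wp_main (n : Nat) : ∀ (t : List Char) (idx : Nat) (acc : List (Int × Int)),
    idx ≤ t.length → t.length - idx ≤ n →
    ((PySem.Chars.split₀ (t.drop idx)).foldl (wpAstep t) (acc, (idx : Int))).1 =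
      acc ++ wpScan (t.drop idx) idx none := by
  induction n with
  | zero =>
    intro t idx acc h1 h2
    have hnil : t.drop idx = [] := by
      apply List.drop_eq_nil_of_le
      omega
    simp [hnil, PySem.Chars.split₀, PySem.Chars.split₀.go, wpScan]
  | succ n ih =>
    intro t idx acc h1 h2
    rcases wp_decomp (t.drop idx) with hall | ⟨sp, w, r, hdec, hsp, hw0, hw, hr⟩
    · rw [wp_split_all_space _ hall, wp_scan_all_space _ _ hall]
      simp
    · obtain ⟨hw1, w', rfl⟩ : ∃ a l, w = a :: l := List.exists_cons_of_ne_nil hw0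
      have hlen : t.length - idx = sp.length + (w'.length + 1) + r.length := by
        have := congrArg List.length hdec
        simp only [List.length_drop, List.length_append, List.length_cons] at this
        omega
      have hstep : PySem.Chars.findFrom t (hw1 :: w') ((idx : Int)) none =
          ((idx + sp.length : Nat) : Int) :=
        wp_findFrom_decomp t idx sp _ r h1 hdec hsp hw0 hw
      set idx' := idx + sp.length + (hw1 :: w').length with hidx'
      have hdrop' : t.drop idx' = r := by
        have h5 : idx' = idx + (sp.length + (hw1 :: w').length) := by omega
        rw [h5, ← List.drop_drop, hdec]
        exact List.drop_left' (by simp)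
      have h1' : idx' ≤ t.length := by
        rw [hidx']
        simp only [List.length_cons]
        omega
      have h2' : t.length - idx' ≤ n := by
        rw [hidx']
        simp only [List.length_cons]
        omega
      have hAstep : wpAstep t (acc, (idx : Int)) (hw1 :: w') =
          (acc ++ [(((idx + sp.length : Nat) : Int),
            ((idx' : Nat) : Int))], ((idx' : Nat) : Int)) := by
        simp only [wpAstep, hstep]
        rw [hidx']
        simp only [List.length_cons]
        push_cast
        ring_nf
      have hB : wpScan (sp ++ (hw1 :: w') ++ r) idx none =
          (((idx + sp.length : Nat) : Int), ((idx' : Nat) : Int)) :: wpScan r idx' none := by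
        rw [List.append_assoc, wp_scan_space sp _ idx hsp]
        simp only [List.cons_append, wpScan, hw hw1 (by simp), Bool.false_eq_true, if_false]
        rw [wp_scan_word w' r (idx + sp.length + 1) (idx + sp.length)
          (fun d hd => hw d (by simp [hd]))]
        have h6 : idx + sp.length + 1 + w'.length = idx' := by
          rw [hidx']
          simp only [List.length_cons]
          omega
        rw [h6, wp_scan_close r idx' (idx + sp.length) hr]
      have hih := ih t idx'
        (acc ++ [(((idx + sp.length : Nat) : Int), ((idx' : Nat) : Int))]) h1' h2'
      rw [hdrop'] at hih
      rw [hdec, wp_split_decomp sp _ r hsp hw0 hw hr]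
      simp only [List.foldl_cons]
      rw [hAstep, hih, hB]
      simp

-- ===== VERDICT (by name: the statement is the Claim_ definition above) =====
theorem word_positions_py_spec : Claim_equal_word_positions_py := by
  intro text _
  unfold Spec_word_positions_py word_positions_py word_positions_py_alt
  have := wp_main text.toList.length text.toList 0 [] (Nat.zero_le _) (by omega)
  simpa using this
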